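-- pv_equiv track=rewrite | github.com/fares8lefi/sign_in-up | lib/screens/examantp.py | poidch
-- ===== SOURCE A (Python) =====
-- def poidch(chaine):
--     somme = 0
--     index = 0
--
--     for char in chaine:
--         if char.isalpha() and char.islower():
--             poids = ord(char) * chaine.index(char)
--             somme += poids
--             index += 1
--
--     return somme
-- ===== SOURCE B (Python) =====
-- def poidch(chaine):
--     first = {}
--     count = {}
--     for i, c in enumerate(chaine):
--         first.setdefault(c, i)
--         count[c] = count.get(c, 0) + 1
--     return sum(ord(c) * first[c] * count[c]
--                for c in first
--                if c.isalpha() and c.islower())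
-- ===== Notes on version B (the rewrite author's own statement) =====
-- stated objective: faster
-- what changed: Replaces A's per-position loop, which rescans the string with .index at every lowercase position, by one enumerate pass that builds first-occurrence-index and count dictionaries and a final sum over the distinct characters (dict keys), and drops A's unused index counter.
import Mathlib
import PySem

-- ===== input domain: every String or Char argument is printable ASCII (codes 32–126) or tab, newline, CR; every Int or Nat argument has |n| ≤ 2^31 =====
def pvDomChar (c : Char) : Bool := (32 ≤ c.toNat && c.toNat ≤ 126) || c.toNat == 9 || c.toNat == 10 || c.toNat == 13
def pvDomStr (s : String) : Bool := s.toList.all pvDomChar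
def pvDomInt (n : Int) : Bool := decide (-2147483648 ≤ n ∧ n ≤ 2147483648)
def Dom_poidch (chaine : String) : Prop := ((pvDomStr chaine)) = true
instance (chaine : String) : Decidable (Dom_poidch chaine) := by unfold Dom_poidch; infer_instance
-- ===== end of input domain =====

-- B precomputes first-index and count dictionaries in one enumerate pass, then sums once per
-- distinct character, instead of A's per-position loop that rescans the string with .index.

-- ===== PORT A =====
-- per-position loop; state is the pair (somme, index) exactly as in the Python
def poidch (chaine : String) : Int :=
  let cs := chaine.toList
  (cs.foldl
    (fun (st : Int × Int) c =>
      if PySem.Chars.isalpha c && PySem.Chars.islower c then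
        (st.1 + (c.toNat : Int) * (((PySem.List.index? cs c).getD 0 : Nat) : Int), st.2 + 1)
      else st)
    (0, 0)).1

-- ===== PORT B =====
-- one enumerate pass builds first (via setdefault) and count (via get-default insert),
-- then the sum runs over the keys of first (dict insertion order)
def poidch_alt (chaine : String) : Int :=
  let st := (PySem.List.enumerate chaine.toList).foldl
    (fun (st : PySem.Dict Char Int × PySem.Dict Char Int) ic =>
      (st.1.setdefault ic.2 ic.1, st.2.insert ic.2 (st.2.getD ic.2 0 + 1)))
    (PySem.Dict.empty, PySem.Dict.empty)
  st.1.keys.foldl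
    (fun s c =>
      if PySem.Chars.isalpha c && PySem.Chars.islower c then
        s + (c.toNat : Int) * st.1.getD c 0 * st.2.getD c 0
      else s) 0

-- ===== PRECONDITION & SPEC =====
def Spec_poidch (chaine : String) (out : Int) : Prop := out = poidch_alt chaine
instance (chaine : String) (out : Int) : Decidable (Spec_poidch chaine out) := by unfold Spec_poidch; infer_instance

-- ===== CLAIM =====
def Claim_equal_poidch : Prop := ∀ (chaine : String), Dom_poidch chaine → Spec_poidch chaine (poidch chaine)

-- ===== LEMMAS AND PROOFS =====

-- A's loop, projected to the sum component, is the sum of per-position contributions.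
theorem pv_foldA (p : Char → Bool) (w : Char → Int) (l : List Char) (a b : Int) :
    (l.foldl (fun (st : Int × Int) c => if p c then (st.1 + w c, st.2 + 1) else st) (a, b)).1
      = a + (l.map (fun c => if p c then w c else 0)).sum := by
  induction l generalizing a b with
  | nil => simp
  | cons c l ih =>
    by_cases h : p c = true <;> simp [h, ih, add_assoc]

-- B's final loop is the sum of per-distinct-character contributions.
theorem pv_foldB (p : Char → Bool) (w : Char → Int) (l : List Char) (a : Int) :
    l.foldl (fun somme c => if p c then somme + w c else somme) a
      = a + (l.map (fun c => if p c then w c else 0)).sum := by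
  induction l generalizing a with
  | nil => simp
  | cons c l ih =>
    by_cases h : p c = true <;> simp [h, ih, add_assoc]

-- the keys of the setdefault fold are the distinct characters, extended in first-occurrence order
theorem pv_first_keys (xs : List Char) (s : Int) (d : PySem.Dict Char Int) :
    ((PySem.List.enumerate xs s).foldl
        (fun d (ic : Int × Char) => d.setdefault ic.2 ic.1) d).keys
      = PySem.Set.update d.keys xs := by
  induction xs generalizing s d with
  | nil => simp [PySem.List.enumerate_nil, PySem.Set.update]
  | cons x xs ih =>
    rw [PySem.List.enumerate_cons, List.foldl_cons, ih]
    have hk : (d.setdefault x s).keys = PySem.Set.add d.keys x := by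
      rw [PySem.Dict.keys_setdefault, PySem.Set.add, PySem.Dict.contains_eq_decide_mem_keys]
      by_cases hm : x ∈ d.keys <;> simp [hm, PySem.Set.contains]
    rw [hk]; rfl

-- the setdefault fold's lookup is the first hit: the old binding if present, else s + first index
theorem pv_first_get? (xs : List Char) (s : Int) (d : PySem.Dict Char Int) (c : Char) :
    ((PySem.List.enumerate xs s).foldl
        (fun d (ic : Int × Char) => d.setdefault ic.2 ic.1) d).get? c
      = (d.get? c).or ((PySem.List.index? xs c).map (fun k => s + (k : Int))) := by
  induction xs generalizing s d with
  | nil => simp [PySem.List.enumerate_nil, PySem.List.index?_eq_idxOf?]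
  | cons x xs ih =>
    rw [PySem.List.enumerate_cons, List.foldl_cons, ih]
    by_cases hxc : c = x
    · subst hxc
      rw [PySem.Dict.get?_setdefault_self, PySem.List.index?_cons_self]
      cases d.get? c <;> simp
    · rw [PySem.Dict.get?_setdefault_of_ne _ _ hxc,
          PySem.List.index?_cons_of_ne _ (fun he => hxc he.symm)]
      cases PySem.List.index? xs c <;> cases d.get? c <;> simp <;> omega

-- specialisation to the empty start: getD is the first-occurrence index
theorem pv_first_getD (cs : List Char) (c : Char) :
    ((PySem.List.enumerate cs).foldl
        (fun d (ic : Int × Char) => d.setdefault ic.2 ic.1) PySem.Dict.empty).getD c 0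
      = (((PySem.List.index? cs c).getD 0 : Nat) : Int) := by
  rw [PySem.Dict.getD_eq_get?_getD, pv_first_get?]
  cases PySem.List.index? cs c <;> simp

-- the counting fold's lookup is the multiplicity
theorem pv_count_getD (cs : List Char) (c : Char) :
    ((PySem.List.enumerate cs).foldl
        (fun d (ic : Int × Char) => d.insert ic.2 (d.getD ic.2 0 + 1)) PySem.Dict.empty).getD c 0
      = ((cs.count c : Nat) : Int) := by
  have h := List.foldl_map (f := fun (ic : Int × Char) => ic.2)
    (g := fun (d : PySem.Dict Char Int) x => d.insert x (d.getD x 0 + 1))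
    (l := PySem.List.enumerate cs) (init := PySem.Dict.empty)
  rw [PySem.List.map_snd_enumerate] at h
  rw [← h, PySem.Dict.getD_foldl_insert_add_one]
  simp

-- grouping a sum over all positions by distinct values, weighting with the multiplicity
theorem pv_group (g : Char → Int) (cs : List Char) :
    ((PySem.Set.ofList cs).map (fun c => g c * ((cs.count c : Nat) : Int))).sum
      = (cs.map g).sum := by
  have hnd : (PySem.Set.ofList cs).Nodup := PySem.Set.nodup_ofList cs
  have htf : (PySem.Set.ofList cs).toFinset = cs.toFinset := by
    ext x; simp [PySem.Set.mem_ofList]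
  calc ((PySem.Set.ofList cs).map (fun c => g c * ((cs.count c : Nat) : Int))).sum
      = ∑ x ∈ (PySem.Set.ofList cs).toFinset, g x * ((cs.count x : Nat) : Int) :=
        (List.sum_toFinset _ hnd).symm
    _ = ∑ x ∈ cs.toFinset, cs.count x • g x := by
        rw [htf]; refine Finset.sum_congr rfl fun x _ => ?_
        simp [mul_comm]
    _ = (cs.map g).sum := (Finset.sum_list_map_count cs g).symm

-- ===== VERDICT (by name: the statement is the Claim_ definition above) =====
theorem poidch_spec : Claim_equal_poidch := by
  intro chaine _
  unfold Spec_poidch poidch poidch_alt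
  rw [PySem.List.foldl_prod_mk
      (fun (d : PySem.Dict Char Int) (ic : Int × Char) => d.setdefault ic.2 ic.1)
      (fun (d : PySem.Dict Char Int) (ic : Int × Char) => d.insert ic.2 (d.getD ic.2 0 + 1))]
  dsimp only
  set cs := chaine.toList with hcs
  set p : Char → Bool := fun c => PySem.Chars.isalpha c && PySem.Chars.islower c with hp
  set w : Char → Int :=
    fun c => (c.toNat : Int) * (((PySem.List.index? cs c).getD 0 : Nat) : Int) with hw
  rw [pv_foldA p w cs 0 0]
  rw [pv_first_keys cs 0 PySem.Dict.empty]
  have hkeys : PySem.Set.update (PySem.Dict.empty : PySem.Dict Char Int).keys cs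
      = PySem.Set.ofList cs := by
    rw [PySem.Set.ofList_eq_foldl]; rfl
  rw [hkeys]
  simp only [pv_first_getD, pv_count_getD]
  rw [pv_foldB p (fun c => w c * ((cs.count c : Nat) : Int)) (PySem.Set.ofList cs) 0]
  congr 1
  rw [← pv_group (fun c => if p c then w c else 0) cs]
  refine congrArg List.sum (List.map_congr_left fun c _ => ?_)
  by_cases h : p c = true <;> simp [h]
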